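-- pv_equiv track=rewrite | github.com/sangeethasanthiralingam/DB-Report-chat-app | utils/domain_analyzer.py | identify_business_domain_from_schema
-- ===== SOURCE A (Python) =====
-- from typing import Dict, Set, List, Optional, Any
--
-- def identify_business_domain_from_schema(schema_info: Dict[str, Any]) -> str:
--     """Identify business domain from schema information using table analysis."""
--     if not schema_info or 'tables' not in schema_info:
--         return 'general'
--
--     tables = set(schema_info['tables'].keys())
--
--     # HR domain tables
--     hr_tables = ['employees', 'attendance_records', 'leave_requests', 'shifts', 'payroll']
--     if any(t.startswith('hr_') or t in hr_tables for t in tables):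
--         return 'hr'
--
--     # Inventory domain tables
--     inventory_tables = ['products', 'sales', 'stock_levels', 'purchases', 'inventory', 'customers', 'suppliers']
--     if any(t.startswith('inv_') or t in inventory_tables for t in tables):
--         return 'inventory'
--
--     # Financial domain tables
--     financial_tables = ['accounts', 'transactions', 'payments', 'invoices', 'bank_accounts']
--     if any(t.startswith('core_fin_') or t in financial_tables for t in tables):
--         return 'financial'
--
--     return 'general'
-- ===== SOURCE B (Python) =====
-- def identify_business_domain_from_schema(schema_info):
--     """Rank-based classifier: each table name is mapped to a numeric priority
--     rank (0=hr, 1=inventory, 2=financial, 3=none); the answer is the label of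
--     the minimum rank seen over all tables."""
--     tbls = (schema_info or {}).get('tables')
--     if tbls is None:
--         return 'general'
--
--     def rank(t):
--         if t.startswith('hr_') or t in ('employees', 'attendance_records', 'leave_requests', 'shifts', 'payroll'):
--             return 0
--         if t.startswith('inv_') or t in ('products', 'sales', 'stock_levels', 'purchases', 'inventory', 'customers', 'suppliers'):
--             return 1
--         if t.startswith('core_fin_') or t in ('accounts', 'transactions', 'payments', 'invoices', 'bank_accounts'):
--             return 2
--         return 3
--
--     best = 3
--     for t in tbls:
--         best = min(best, rank(t))
--     return ['hr', 'inventory', 'financial', 'general'][best]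
-- ===== Notes on version B (the rewrite author's own statement) =====
-- stated objective: alternative
-- what changed: Replaces A's set() construction plus three separate any() passes (one per domain) with a per-table numeric priority rank (0=hr,1=inventory,2=financial,3=none), a single fold taking the minimum rank, and a final table lookup of the label.
import Mathlib
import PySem

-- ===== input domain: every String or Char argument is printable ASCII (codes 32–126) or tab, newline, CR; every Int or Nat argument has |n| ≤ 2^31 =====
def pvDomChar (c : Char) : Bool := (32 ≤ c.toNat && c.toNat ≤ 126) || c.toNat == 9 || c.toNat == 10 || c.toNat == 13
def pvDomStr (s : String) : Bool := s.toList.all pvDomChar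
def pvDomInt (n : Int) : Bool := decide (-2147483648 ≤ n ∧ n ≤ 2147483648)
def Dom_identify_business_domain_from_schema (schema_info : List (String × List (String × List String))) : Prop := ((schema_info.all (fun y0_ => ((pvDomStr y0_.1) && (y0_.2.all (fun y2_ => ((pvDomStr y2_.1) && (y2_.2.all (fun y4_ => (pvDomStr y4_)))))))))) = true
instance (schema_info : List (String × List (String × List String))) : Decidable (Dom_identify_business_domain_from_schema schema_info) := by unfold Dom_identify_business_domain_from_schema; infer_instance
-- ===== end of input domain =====

-- B replaces A's set() plus three separate any() passes with a per-table numeric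
-- priority rank (0=hr, 1=inventory, 2=financial, 3=none), a single minimum fold,
-- and a label-table lookup; same cost, different decomposition.

-- ===== PORT A =====
def pvHrTables : List String := ["employees", "attendance_records", "leave_requests", "shifts", "payroll"]
def pvInvTables : List String := ["products", "sales", "stock_levels", "purchases", "inventory", "customers", "suppliers"]
def pvFinTables : List String := ["accounts", "transactions", "payments", "invoices", "bank_accounts"]

def pvHrP (t : String) : Bool := PySem.Str.startswith t "hr_" || pvHrTables.contains t
def pvInvP (t : String) : Bool := PySem.Str.startswith t "inv_" || pvInvTables.contains t
def pvFinP (t : String) : Bool := PySem.Str.startswith t "core_fin_" || pvFinTables.contains t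

def identify_business_domain_from_schema (schema_info : List (String × List (String × List String))) : String :=
  if schema_info.isEmpty then "general" else
  match schema_info.find? (fun p => p.1 == "tables") with
  | none => "general"
  | some (_, tbls) =>
    let tables : PySem.Set String := PySem.Set.ofList (tbls.map (·.1))
    if tables.any pvHrP then "hr"
    else if tables.any pvInvP then "inventory"
    else if tables.any pvFinP then "financial"
    else "general"

-- ===== PORT B =====
-- per-table priority rank: 0 = hr, 1 = inventory, 2 = financial, 3 = no match
def pvRank (t : String) : Nat :=
  if PySem.Str.startswith t "hr_" || ["employees", "attendance_records", "leave_requests", "shifts", "payroll"].contains t then 0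
  else if PySem.Str.startswith t "inv_" || ["products", "sales", "stock_levels", "purchases", "inventory", "customers", "suppliers"].contains t then 1
  else if PySem.Str.startswith t "core_fin_" || ["accounts", "transactions", "payments", "invoices", "bank_accounts"].contains t then 2
  else 3

def identify_business_domain_from_schema_alt (schema_info : List (String × List (String × List String))) : String :=
  -- (schema_info or {}).get('tables'): first-match association lookup; none on the empty dict too
  match PySem.Dict.get? (PySem.Dict.mk schema_info) "tables" with
  | none => "general"
  | some tbls =>
    let best := tbls.foldl (fun m p => min m (pvRank p.1)) 3
    -- best ≤ 3 always, so this Python list indexing never goes out of range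
    ["hr", "inventory", "financial", "general"].getD best "general"

-- ===== PRECONDITION & SPEC =====
def Spec_identify_business_domain_from_schema (schema_info : List (String × List (String × List String))) (out : String) : Prop := out = identify_business_domain_from_schema_alt schema_info
instance (schema_info : List (String × List (String × List String))) (out : String) : Decidable (Spec_identify_business_domain_from_schema schema_info out) := by unfold Spec_identify_business_domain_from_schema; infer_instance

-- ===== CLAIM (what is proved, stated in full; the proofs are below) =====
def Claim_equal_identify_business_domain_from_schema : Prop := ∀ (schema_info : List (String × List (String × List String))), Dom_identify_business_domain_from_schema schema_info → Spec_identify_business_domain_from_schema schema_info (identify_business_domain_from_schema schema_info)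

-- ===== LEMMAS AND PROOFS =====

theorem pv_any_ofList (l : List String) (p : String → Bool) :
    (PySem.Set.ofList l).any p = l.any p := by
  rw [Bool.eq_iff_iff]
  simp [List.any_eq_true, PySem.Set.mem_ofList]

-- pvRank characterised by A's three predicates
theorem pv_rank_char (t : String) :
    pvRank t = (if pvHrP t then 0 else if pvInvP t then 1 else if pvFinP t then 2 else 3) := by
  simp [pvRank, pvHrP, pvInvP, pvFinP, pvHrTables, pvInvTables, pvFinTables]

-- the if-chain value the minimum fold computes
def pvBest (l : List String) : Nat :=
  if l.any pvHrP then 0 else if l.any pvInvP then 1 else if l.any pvFinP then 2 else 3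

theorem pv_best_cons (t : String) (l : List String) :
    pvBest (t :: l) = min (pvRank t) (pvBest l) := by
  simp only [pvBest, pv_rank_char, List.any_cons]
  by_cases h1 : pvHrP t <;> by_cases h2 : pvInvP t <;> by_cases h3 : pvFinP t <;>
    simp [h1, h2, h3] <;> split_ifs <;> omega

theorem pv_foldl_min (l : List (String × List String)) (m : Nat) (hm : m ≤ 3) :
    l.foldl (fun m p => min m (pvRank p.1)) m = min m (pvBest (l.map (·.1))) := by
  induction l generalizing m with
  | nil => simp [pvBest]; omega
  | cons x xs ih =>
    rw [List.foldl_cons, ih (min m (pvRank x.1)) (by omega), List.map_cons, pv_best_cons]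
    omega

theorem pv_lookup (tbls : List (String × List String)) :
    (["hr", "inventory", "financial", "general"].getD
        (tbls.foldl (fun m p => min m (pvRank p.1)) 3) "general")
      = (if (tbls.map (·.1)).any pvHrP then "hr"
         else if (tbls.map (·.1)).any pvInvP then "inventory"
         else if (tbls.map (·.1)).any pvFinP then "financial"
         else "general") := by
  rw [pv_foldl_min tbls 3 (by omega)]
  unfold pvBest
  split_ifs <;> rfl

-- B's Dict.get? on the raw list is the first-match association lookup
theorem pv_get?_eq (s : List (String × List (String × List String))) :
    PySem.Dict.get? (PySem.Dict.mk s) "tables"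
      = (s.find? (fun p => p.1 == "tables")).map (·.2) := by
  induction s with
  | nil => simp [PySem.Dict.get?]
  | cons x xs ih =>
    rw [PySem.Dict.get?_mk_cons, List.find?]
    by_cases hx : x.1 = "tables"
    · simp [hx]
    · rw [show (x.1 == "tables") = false from beq_eq_false_iff_ne.mpr hx]
      exact ih.symm

-- ===== VERDICT (by name: the statement is the Claim_ definition above) =====
theorem identify_business_domain_from_schema_spec : Claim_equal_identify_business_domain_from_schema := by
  intro s _
  unfold Spec_identify_business_domain_from_schema
  unfold identify_business_domain_from_schema identify_business_domain_from_schema_alt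
  rw [pv_get?_eq]
  by_cases he : s.isEmpty
  · rw [List.isEmpty_iff] at he; subst he; rfl
  · simp only [he, Bool.false_eq_true, if_false]
    cases hf : s.find? (fun p => p.1 == "tables") with
    | none => rfl
    | some pr =>
      obtain ⟨k, tbls⟩ := pr
      simp only [Option.map_some, pv_lookup, pv_any_ofList]
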